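-- pv_equiv track=rewrite | github.com/derekwan1/Bioinformatics-Toolbox | MapCalc_c.py | sparse_regions
-- ===== SOURCE A (Python) =====
-- def sparse_regions(organized, length_of_candidate):
-- 	k, count = 0, 0
-- 	regions = []
-- 	while k <= len(organized) - 1:
-- 		curr_protein_index = organized[k][1]
-- 		if k == len(organized) - 1:
-- 			count += sum(organized[k][2]) + (length_of_candidate*(len(organized[k][2])-1))
-- 			regions.append([curr_protein_index, count])
-- 			break
-- 		next_protein_index = organized[k+1][1]
-- 		count += sum(organized[k][2]) + (length_of_candidate*(len(organized[k][2])-1))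
-- 		if next_protein_index != curr_protein_index + 1:
-- 			regions.append([curr_protein_index, count])
-- 			count = 0
-- 		k += 1
-- 	return regions
-- ===== SOURCE B (Python) =====
-- def sparse_regions(organized, length_of_candidate):
--     def solve(lo, hi):
--         if hi - lo == 1:
--             e = organized[lo]
--             return [[e[1], sum(e[2]) + length_of_candidate * (len(e[2]) - 1)]]
--         mid = (lo + hi) // 2
--         left = solve(lo, mid)
--         right = solve(mid, hi)
--         if organized[mid][1] == organized[mid - 1][1] + 1:
--             merged = [right[0][0], left[-1][1] + right[0][1]]
--             return left[:-1] + [merged] + right[1:]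
--         return left + right
--     return [] if not organized else solve(0, len(organized))
-- ===== Notes on version B (the rewrite author's own statement) =====
-- stated objective: alternative
-- what changed: Replaces A's single linear accumulate-and-flush pass with a divide-and-conquer: the list is split in halves, each half's regions are computed recursively, and the two results are concatenated, merging the boundary regions into one when the protein indices at the split point are consecutive.
import Mathlib
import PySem

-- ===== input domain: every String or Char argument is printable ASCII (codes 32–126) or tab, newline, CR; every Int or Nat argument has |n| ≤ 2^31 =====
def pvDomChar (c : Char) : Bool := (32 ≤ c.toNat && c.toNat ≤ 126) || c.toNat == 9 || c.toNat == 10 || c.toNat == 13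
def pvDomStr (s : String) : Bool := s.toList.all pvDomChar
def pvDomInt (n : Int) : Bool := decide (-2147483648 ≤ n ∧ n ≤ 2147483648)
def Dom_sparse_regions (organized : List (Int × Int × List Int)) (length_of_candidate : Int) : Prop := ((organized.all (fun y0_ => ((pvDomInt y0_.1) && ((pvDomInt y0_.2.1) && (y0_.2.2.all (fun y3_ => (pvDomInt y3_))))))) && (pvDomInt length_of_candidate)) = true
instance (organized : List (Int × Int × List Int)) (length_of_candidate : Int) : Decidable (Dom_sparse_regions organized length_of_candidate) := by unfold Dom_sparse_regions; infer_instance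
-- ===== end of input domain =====

-- B replaces A's linear accumulate-and-flush scan by a divide-and-conquer that solves the two
-- halves recursively and merges the boundary regions when the split point is index-consecutive
-- (objective: alternative).


-- ===== PORT A =====
-- literal transliteration of A's while loop: k, count, regions are the loop state
def sparse_regions_loopA (organized : List (Int × Int × List Int)) (length_of_candidate : Int)
    (k : Nat) (count : Int) (regions : List (List Int)) : List (List Int) :=
  if h : k < organized.length then
    let curr_protein_index := (organized[k]).2.1
    if k = organized.length - 1 then
      regions ++ [[curr_protein_index,
        count + (organized[k]).2.2.sum + length_of_candidate * (((organized[k]).2.2.length : Int) - 1)]]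
    else
      let next_protein_index := (organized.getD (k+1) default).2.1
      let count' := count + (organized[k]).2.2.sum + length_of_candidate * (((organized[k]).2.2.length : Int) - 1)
      if next_protein_index ≠ curr_protein_index + 1 then
        sparse_regions_loopA organized length_of_candidate (k+1) 0 (regions ++ [[curr_protein_index, count']])
      else
        sparse_regions_loopA organized length_of_candidate (k+1) count' regions
  else regions
termination_by organized.length - k

def sparse_regions (organized : List (Int × Int × List Int)) (length_of_candidate : Int) : List (List Int) :=
  sparse_regions_loopA organized length_of_candidate 0 0 []

-- ===== PORT B =====
-- B's inner `solve(lo, hi)`: divide and conquer on the index range [lo, hi) of `organized`.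
-- Python's solve is only ever called with lo < hi, so its `hi - lo == 1` base test is ported
-- as `hi - lo ≤ 1` (equivalent on every reachable call; it makes the recursion total).
def sparse_regions_solveB (organized : List (Int × Int × List Int)) (length_of_candidate : Int)
    (lo hi : Nat) : List (List Int) :=
  if hi - lo ≤ 1 then
    let e := organized.getD lo default
    [[e.2.1, e.2.2.sum + length_of_candidate * ((e.2.2.length : Int) - 1)]]
  else
    let mid := (lo + hi) / 2
    let left := sparse_regions_solveB organized length_of_candidate lo mid
    let right := sparse_regions_solveB organized length_of_candidate mid hi
    if (organized.getD mid default).2.1 = (organized.getD (mid - 1) default).2.1 + 1 then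
      let merged := [(right.getD 0 []).getD 0 0, (left.getLastD []).getD 1 0 + (right.getD 0 []).getD 1 0]
      (left.dropLast ++ [merged]) ++ right.drop 1
    else left ++ right
termination_by hi - lo
decreasing_by all_goals omega

def sparse_regions_alt (organized : List (Int × Int × List Int)) (length_of_candidate : Int) : List (List Int) :=
  if organized.isEmpty then []
  else sparse_regions_solveB organized length_of_candidate 0 organized.length

-- ===== PRECONDITION & SPEC =====
def Spec_sparse_regions (organized : List (Int × Int × List Int)) (length_of_candidate : Int) (out : List (List Int)) : Prop := out = sparse_regions_alt organized length_of_candidate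
instance (organized : List (Int × Int × List Int)) (length_of_candidate : Int) (out : List (List Int)) : Decidable (Spec_sparse_regions organized length_of_candidate out) := by unfold Spec_sparse_regions; infer_instance

-- ===== CLAIM (what is proved, stated in full; the proofs are below) =====
def Claim_equal_sparse_regions : Prop := ∀ (organized : List (Int × Int × List Int)) (length_of_candidate : Int), Dom_sparse_regions organized length_of_candidate → Spec_sparse_regions organized length_of_candidate (sparse_regions organized length_of_candidate)

-- ===== LEMMAS AND PROOFS =====

-- weighted value of one element
def pvV (L : Int) (e : Int × Int × List Int) : Int :=
  e.2.2.sum + L * ((e.2.2.length : Int) - 1)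

-- reference recursion: regions of a nonempty list, structurally (look-ahead)
def pvAddFirst (c : Int) : List (List Int) → List (List Int)
  | [i, t] :: rs => [i, c + t] :: rs
  | rs => rs

def pvR (L : Int) : List (Int × Int × List Int) → List (List Int)
  | [] => []
  | [e] => [[e.2.1, pvV L e]]
  | e :: e' :: rest =>
      if e'.2.1 ≠ e.2.1 + 1 then [[e.2.1, pvV L e]] ++ pvR L (e' :: rest)
      else pvAddFirst (pvV L e) (pvR L (e' :: rest))

-- A's loop in list form (look-ahead over the remaining suffix)
def pvGo (L : Int) : List (Int × Int × List Int) → Int → List (List Int) → List (List Int)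
  | [], _, regions => regions
  | [e], count, regions => regions ++ [[e.2.1, count + pvV L e]]
  | e :: e' :: rest, count, regions =>
      if e'.2.1 ≠ e.2.1 + 1 then
        pvGo L (e' :: rest) 0 (regions ++ [[e.2.1, count + pvV L e]])
      else
        pvGo L (e' :: rest) (count + pvV L e) regions

theorem pvLoopA_eq_go (L : Int) (organized : List (Int × Int × List Int)) (k : Nat)
    (count : Int) (regions : List (List Int)) :
    sparse_regions_loopA organized L k count regions = pvGo L (organized.drop k) count regions := by
  by_cases h : k < organized.length
  · have hd : organized.drop k = organized[k] :: organized.drop (k+1) :=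
      List.drop_eq_getElem_cons h
    by_cases hlast : k = organized.length - 1
    · have hnil : organized.drop (k+1) = [] := by
        apply List.drop_eq_nil_of_le; omega
      rw [sparse_regions_loopA, dif_pos h, if_pos hlast, hd, hnil]
      simp [pvGo, pvV, add_assoc]
    · have hk1 : k + 1 < organized.length := by omega
      have hd2 : organized.drop (k+1) = organized[k+1] :: organized.drop (k+2) :=
        List.drop_eq_getElem_cons hk1
      have hget : organized.getD (k+1) default = organized[k+1] := List.getD_eq_getElem organized default hk1
      have ih1 := pvLoopA_eq_go L organized (k+1) 0 (regions ++ [[(organized[k]).2.1,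
        count + (organized[k]).2.2.sum + L * (((organized[k]).2.2.length : Int) - 1)]])
      have ih2 := pvLoopA_eq_go L organized (k+1)
        (count + (organized[k]).2.2.sum + L * (((organized[k]).2.2.length : Int) - 1)) regions
      rw [sparse_regions_loopA, dif_pos h, if_neg hlast]
      rw [hd, hd2, pvGo, hget, ← hd2]
      simp only [pvV, ← add_assoc]
      split_ifs with hne
      · exact ih1
      · exact ih2
  · have hnil : organized.drop k = [] := by
      apply List.drop_eq_nil_of_le; omega
    rw [sparse_regions_loopA, dif_neg h, hnil, pvGo]

-- shape of pvR on a nonempty list: a 2-element head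
theorem pvR_shape (L : Int) (e : Int × Int × List Int) (xs : List (Int × Int × List Int)) :
    ∃ i t rs, pvR L (e :: xs) = [i, t] :: rs := by
  induction xs generalizing e with
  | nil => exact ⟨e.2.1, pvV L e, [], rfl⟩
  | cons e' rest ih =>
      rw [pvR]
      split_ifs with hne
      · exact ⟨e.2.1, pvV L e, pvR L (e' :: rest), rfl⟩
      · obtain ⟨i, t, rs, hh⟩ := ih e'
        exact ⟨i, pvV L e + t, rs, by rw [hh]; rfl⟩

-- A's loop equals pvR with the pending count added to the first region
theorem pvGo_eq_R (L : Int) (xs : List (Int × Int × List Int)) (e : Int × Int × List Int)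
    (count : Int) (regions : List (List Int)) :
    pvGo L (e :: xs) count regions = regions ++ pvAddFirst count (pvR L (e :: xs)) := by
  induction xs generalizing e count regions with
  | nil => simp [pvGo, pvR, pvAddFirst]
  | cons e' rest ih =>
      rw [pvGo, pvR]
      split_ifs with hne
      · rw [ih e' 0]
        obtain ⟨i, t, rs, hh⟩ := pvR_shape L e' rest
        simp [hh, pvAddFirst]
      · rw [ih e' (count + pvV L e)]
        obtain ⟨i, t, rs, hh⟩ := pvR_shape L e' rest
        rw [hh]
        simp [pvAddFirst, add_assoc]

-- the merge B performs at a split point, as used in the append lemma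
def pvMerge (left right : List (List Int)) : List (List Int) :=
  (left.dropLast ++ [[(right.getD 0 []).getD 0 0, (left.getLastD []).getD 1 0 + (right.getD 0 []).getD 1 0]]) ++ right.drop 1

-- addFirst commutes with the merge (left nonempty with 2-element head, right likewise)
theorem pvAddFirst_merge (c : Int) (i t : Int) (rs : List (List Int)) (j u : Int) (rs' : List (List Int)) :
    pvAddFirst c (pvMerge ([i, t] :: rs) ([j, u] :: rs')) =
    pvMerge (pvAddFirst c ([i, t] :: rs)) ([j, u] :: rs') := by
  cases rs with
  | nil => simp [pvMerge, pvAddFirst, add_assoc]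
  | cons r rest =>
      have h1 : (([i, t] : List Int) :: r :: rest).dropLast = [i, t] :: (r :: rest).dropLast := rfl
      have h2 : (([i, t] : List Int) :: r :: rest).getLastD [] = (r :: rest).getLastD [] := by
        simp [List.getLastD]
      simp only [pvMerge, pvAddFirst, h1, h2]
      rfl

-- the key divide-and-conquer law for pvR: regions of xs ++ ys from regions of the halves
theorem pvR_append (L : Int) (xs ys : List (Int × Int × List Int)) (hx : xs ≠ []) (hy : ys ≠ []) :
    pvR L (xs ++ ys) =
      if (ys.getD 0 default).2.1 = (xs.getLastD default).2.1 + 1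
      then pvMerge (pvR L xs) (pvR L ys)
      else pvR L xs ++ pvR L ys := by
  induction xs with
  | nil => exact absurd rfl hx
  | cons e xs' ih =>
      cases xs' with
      | nil =>
          cases ys with
          | nil => exact absurd rfl hy
          | cons f ys' =>
              obtain ⟨j, u, rs', hyR⟩ := pvR_shape L f ys'
              have hR1 : pvR L [e] = [[e.2.1, pvV L e]] := rfl
              have hcons : pvR L (e :: f :: ys') =
                  if f.2.1 ≠ e.2.1 + 1 then [[e.2.1, pvV L e]] ++ pvR L (f :: ys')
                  else pvAddFirst (pvV L e) (pvR L (f :: ys')) := rfl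
              simp only [List.singleton_append, hcons, hR1]
              by_cases hc : f.2.1 = e.2.1 + 1
              · rw [if_neg (by simpa using hc), if_pos (by simpa using hc)]
                rw [hyR]
                simp [pvMerge, pvAddFirst]
              · rw [if_pos (by simpa using hc), if_neg (by simpa using hc)]
      | cons e2 xs'' =>
          have hx' : (e2 :: xs'') ≠ [] := by simp
          have ihh := ih hx'
          have hlast : ((e :: e2 :: xs'').getLastD default) = ((e2 :: xs'').getLastD default) := by
            simp [List.getLastD]
          have happ : (e :: e2 :: xs'') ++ ys = e :: e2 :: (xs'' ++ ys) := by simp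
          obtain ⟨i, t, rs, hxR⟩ := pvR_shape L e2 xs''
          have hstep : pvR L (e :: e2 :: (xs'' ++ ys)) =
              if e2.2.1 ≠ e.2.1 + 1 then [[e.2.1, pvV L e]] ++ pvR L (e2 :: (xs'' ++ ys))
              else pvAddFirst (pvV L e) (pvR L (e2 :: (xs'' ++ ys))) := rfl
          have hstep2 : pvR L (e :: e2 :: xs'') =
              if e2.2.1 ≠ e.2.1 + 1 then [[e.2.1, pvV L e]] ++ pvR L (e2 :: xs'')
              else pvAddFirst (pvV L e) (pvR L (e2 :: xs'')) := rfl
          have hmid : (e2 :: (xs'' ++ ys)) = (e2 :: xs'') ++ ys := by simp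
          rw [happ, hstep, hmid, ihh, hstep2, hlast]
          by_cases hb : (ys.getD 0 default).2.1 = ((e2 :: xs'').getLastD default).2.1 + 1
          · rw [if_pos hb, if_pos hb]
            by_cases hc : e2.2.1 = e.2.1 + 1
            · rw [if_neg (by simpa using hc), if_neg (by simpa using hc)]
              cases ys with
              | nil => exact absurd rfl hy
              | cons f ys' =>
                  obtain ⟨j, u, rs', hyR⟩ := pvR_shape L f ys'
                  rw [hxR, hyR, pvAddFirst_merge]
            · rw [if_pos (by simpa using hc), if_pos (by simpa using hc)]
              rw [hxR]
              cases ys with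
              | nil => exact absurd rfl hy
              | cons f ys' =>
                  obtain ⟨j, u, rs', hyR⟩ := pvR_shape L f ys'
                  rw [hyR]
                  simp only [pvMerge]
                  have hdl : ((([e.2.1, pvV L e] : List Int) :: [i, t] :: rs).dropLast)
                      = [e.2.1, pvV L e] :: (([i, t] :: rs).dropLast) := rfl
                  have hgl : ((([e.2.1, pvV L e] : List Int) :: [i, t] :: rs).getLastD [])
                      = (([i, t] :: rs).getLastD []) := by simp [List.getLastD]
                  simp [hdl]
          · rw [if_neg hb, if_neg hb]
            by_cases hc : e2.2.1 = e.2.1 + 1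
            · rw [if_neg (by simpa using hc), if_neg (by simpa using hc)]
              rw [hxR]
              rfl
            · rw [if_pos (by simpa using hc), if_pos (by simpa using hc)]
              simp
-- B's solve on [lo, hi) computes pvR of that segment
theorem pvSolveB_eq_R (organized : List (Int × Int × List Int)) (L : Int) (lo hi : Nat)
    (hlo : lo < hi) (hhi : hi ≤ organized.length) :
    sparse_regions_solveB organized L lo hi = pvR L ((organized.drop lo).take (hi - lo)) := by
  by_cases hbase : hi - lo ≤ 1
  · have h1 : hi - lo = 1 := by omega
    have hlt : lo < organized.length := by omega
    have hd : organized.drop lo = organized[lo] :: organized.drop (lo+1) :=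
      List.drop_eq_getElem_cons hlt
    rw [sparse_regions_solveB, if_pos hbase, h1, hd]
    have hg : organized.getD lo default = organized[lo] := List.getD_eq_getElem organized default hlt
    rw [hg]
    rfl
  · have hmid1 : lo < (lo + hi) / 2 := by omega
    have hmid2 : (lo + hi) / 2 < hi := by omega
    set mid := (lo + hi) / 2 with hm
    have ihl := pvSolveB_eq_R organized L lo mid hmid1 (by omega)
    have ihr := pvSolveB_eq_R organized L mid hi hmid2 hhi
    have hseg : (organized.drop lo).take (hi - lo)
        = (organized.drop lo).take (mid - lo) ++ (organized.drop mid).take (hi - mid) := by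
      rw [show hi - lo = (mid - lo) + (hi - mid) by omega, List.take_add, List.drop_drop,
          show lo + (mid - lo) = mid by omega]
    have hxne : (organized.drop lo).take (mid - lo) ≠ [] := by
      have : ((organized.drop lo).take (mid - lo)).length = mid - lo := by
        rw [List.length_take, List.length_drop]; omega
      intro hc; rw [hc] at this; simp at this; omega
    have hyne : (organized.drop mid).take (hi - mid) ≠ [] := by
      have : ((organized.drop mid).take (hi - mid)).length = hi - mid := by
        rw [List.length_take, List.length_drop]; omega
      intro hc; rw [hc] at this; simp at this; omega
    have hmidlt : mid < organized.length := by omega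
    have hym : ((organized.drop mid).take (hi - mid)).getD 0 default = organized[mid] := by
      have hd : organized.drop mid = organized[mid] :: organized.drop (mid+1) :=
        List.drop_eq_getElem_cons hmidlt
      rw [hd]
      have : hi - mid ≠ 0 := by omega
      cases h : hi - mid with
      | zero => omega
      | succ n => simp [List.getElem?_eq_getElem hmidlt]
    have hm1lt : mid - 1 < organized.length := by omega
    have hxl : ((organized.drop lo).take (mid - lo)).getLastD default = organized[mid - 1] := by
      have hlen : ((organized.drop lo).take (mid - lo)).length = mid - lo := by
        rw [List.length_take, List.length_drop]; omega
      have hidx : mid - lo - 1 < ((organized.drop lo).take (mid - lo)).length := by omega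
      rw [List.getLastD_eq_getLast?, List.getLast?_eq_getElem?, hlen,
          List.getElem?_eq_getElem (by omega)]
      simp only [Option.getD_some]
      rw [List.getElem_take, List.getElem_drop]
      congr 1
      omega
    rw [sparse_regions_solveB, if_neg hbase]
    simp only [← hm]
    rw [hseg, pvR_append L _ _ hxne hyne, hym, hxl, ihl, ihr]
    have hg1 : organized.getD mid default = organized[mid] := List.getD_eq_getElem organized default hmidlt
    have hg2 : organized.getD (mid - 1) default = organized[mid - 1] := List.getD_eq_getElem organized default hm1lt
    rw [hg1, hg2]
    split_ifs with hb
    · rfl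
    · rfl
termination_by hi - lo
decreasing_by all_goals omega

theorem pvAB (L : Int) (organized : List (Int × Int × List Int)) :
    sparse_regions organized L = sparse_regions_alt organized L := by
  cases organized with
  | nil =>
      unfold sparse_regions sparse_regions_alt
      rw [pvLoopA_eq_go]; rfl
  | cons e rest =>
      have hA : sparse_regions (e :: rest) L = pvR L (e :: rest) := by
        unfold sparse_regions
        rw [pvLoopA_eq_go]
        simp only [List.drop_zero]
        rw [pvGo_eq_R]
        obtain ⟨i, t, rs, hh⟩ := pvR_shape L e rest
        rw [hh]
        simp [pvAddFirst]
      have hB : sparse_regions_alt (e :: rest) L = pvR L (e :: rest) := by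
        unfold sparse_regions_alt
        rw [if_neg (by simp)]
        rw [pvSolveB_eq_R (e :: rest) L 0 (e :: rest).length (by simp) (le_refl _)]
        simp
      rw [hA, hB]

-- ===== VERDICT (by name: the statement is the Claim_ definition above) =====
theorem sparse_regions_spec : Claim_equal_sparse_regions := by
  intro organized L _
  unfold Spec_sparse_regions
  exact pvAB L organized
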